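-- pv_equiv track=rewrite | github.com/smart-patrol/ai-ml-interview-prep-and-more | data-structures-python/ChallangeLists.py | rearrange_list2
-- ===== SOURCE A (Python) =====
-- from typing import List
--
-- def rearrange_list2(lst:List[int]) -> List[int]:
--     """
--     Implement a function rearrange(lst) which rearranges the elements such that all the negative elements appear on the left and positive elements appear at the right of the list. Note that it is not necessary to maintain the sorted order of the input list.
--     """
--     # TC: O(n)
--     # SC: O(n)
--     # get all negative numbers
--     negative = []
--     positive = []
--     for n in lst:
--         if n < 0:
--             negative.append(n)
--         else:
--             positive.append(n)
--     # merge negative and positive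
--     return negative + positive
-- ===== SOURCE B (Python) =====
-- from typing import List
--
-- def rearrange_list2(lst: List[int]) -> List[int]:
--     # Stable sort on a boolean key: negatives (key False) come first,
--     # non-negatives (key True) after, each group keeping input order.
--     return sorted(lst, key=lambda n: n >= 0)
-- ===== Notes on version B (the rewrite author's own statement) =====
-- stated objective: idiomatic
-- what changed: Replaces the explicit two-accumulator partition loop with a single stable sort keyed on the boolean n >= 0, relying on sort stability to preserve within-group order.
import Mathlib
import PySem

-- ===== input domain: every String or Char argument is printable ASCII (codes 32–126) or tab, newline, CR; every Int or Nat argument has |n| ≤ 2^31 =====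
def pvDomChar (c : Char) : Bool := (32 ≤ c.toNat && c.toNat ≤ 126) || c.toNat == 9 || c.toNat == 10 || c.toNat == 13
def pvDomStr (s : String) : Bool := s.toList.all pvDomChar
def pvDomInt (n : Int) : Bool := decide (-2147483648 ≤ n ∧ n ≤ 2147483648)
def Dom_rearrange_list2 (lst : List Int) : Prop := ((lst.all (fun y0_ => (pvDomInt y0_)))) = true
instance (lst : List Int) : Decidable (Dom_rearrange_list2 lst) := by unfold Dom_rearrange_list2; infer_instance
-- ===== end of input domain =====

-- B replaces A's two-accumulator partition loop with one stable sort on the boolean key n >= 0 (idiomatic one-liner, same result).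


-- ===== PORT A =====
-- loop: for n in lst: append n to negative (n < 0) or positive; then negative + positive
def rearrange_list2 (lst : List Int) : List Int :=
  let acc := lst.foldl
    (fun (acc : List Int × List Int) n =>
      if n < 0 then (acc.1 ++ [n], acc.2) else (acc.1, acc.2 ++ [n]))
    ([], [])
  acc.1 ++ acc.2

-- ===== PORT B =====
-- sorted(lst, key=lambda n: n >= 0)  — stable sort on a Bool key (false < true)
def rearrange_list2_alt (lst : List Int) : List Int :=
  PySem.List.sorted lst (fun n => decide (0 ≤ n))

-- ===== PRECONDITION & SPEC =====
def Spec_rearrange_list2 (lst : List Int) (out : List Int) : Prop := out = rearrange_list2_alt lst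
instance (lst : List Int) (out : List Int) : Decidable (Spec_rearrange_list2 lst out) := by unfold Spec_rearrange_list2; infer_instance

-- ===== CLAIM (what is proved, stated in full; the proofs are below) =====
def Claim_equal_rearrange_list2 : Prop := ∀ (lst : List Int), Dom_rearrange_list2 lst → Spec_rearrange_list2 lst (rearrange_list2 lst)

-- ===== LEMMAS AND PROOFS =====

-- A's loop, with its accumulators generalized, computes the two filters.
theorem rearrangeA_foldl (lst neg pos : List Int) :
    lst.foldl
      (fun (acc : List Int × List Int) n =>
        if n < 0 then (acc.1 ++ [n], acc.2) else (acc.1, acc.2 ++ [n]))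
      (neg, pos)
    = (neg ++ lst.filter (fun n => decide (n < 0)),
       pos ++ lst.filter (fun n => !decide (n < 0))) := by
  induction lst generalizing neg pos with
  | nil => simp
  | cons x xs ih =>
    by_cases hx : x < 0 <;> simp [hx, ih]

-- inserting a key-true element at the end of a (key-false ++ key-true) list
theorem insertBy_true (x : Int) (hx : 0 ≤ x) (ys : List Int) :
    PySem.List.insertBy
      (fun a b => decide ((fun n => decide (0 ≤ n)) a < (fun n => decide (0 ≤ n)) b)) x ys
    = ys ++ [x] := by
  apply PySem.List.insertBy_of_forall_not_before
  intro y _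
  simp [hx]

-- inserting a key-false element between the false block and the true block
theorem insertBy_false (x : Int) (hx : x < 0) (neg pos : List Int)
    (hneg : ∀ y ∈ neg, y < 0) (hpos : ∀ y ∈ pos, 0 ≤ y) :
    PySem.List.insertBy
      (fun a b => decide ((fun n => decide (0 ≤ n)) a < (fun n => decide (0 ≤ n)) b)) x (neg ++ pos)
    = neg ++ x :: pos := by
  induction neg with
  | nil =>
    cases pos with
    | nil => simp [PySem.List.insertBy]
    | cons y ys =>
      have hy : 0 ≤ y := hpos y (by simp)
      simp [PySem.List.insertBy, Bool.lt_iff, hx, hy]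
  | cons n ns ih =>
    have hn : n < 0 := hneg n (by simp)
    have : (decide ((decide (0 ≤ x)) < (decide (0 ≤ n))) : Bool) = false := by
      simp [Bool.lt_iff, not_le.mpr hn]
    simp only [List.cons_append, PySem.List.insertBy, this]
    simp only [Bool.false_eq_true, if_false]
    rw [ih (fun y hy => hneg y (by simp [hy]))]

-- B's stable sort on the boolean key is the partition: false block then true block
theorem sorted_bool_key (lst neg pos : List Int)
    (hneg : ∀ y ∈ neg, y < 0) (hpos : ∀ y ∈ pos, 0 ≤ y) :
    lst.foldl
      (fun acc x => PySem.List.insertBy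
        (fun a b => decide ((fun n => decide (0 ≤ n)) a < (fun n => decide (0 ≤ n)) b)) x acc)
      (neg ++ pos)
    = (neg ++ lst.filter (fun n => decide (n < 0)))
      ++ (pos ++ lst.filter (fun n => !decide (n < 0))) := by
  induction lst generalizing neg pos with
  | nil => simp
  | cons x xs ih =>
    by_cases hx : x < 0
    · have h1 := insertBy_false x hx neg pos hneg hpos
      simp only [List.foldl_cons, h1, List.filter_cons]
      have h2 := ih (neg ++ [x]) pos
        (by intro y hy; rcases List.mem_append.mp hy with h | h
            · exact hneg y h
            · simp at h; omega) hpos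
      simpa [hx] using h2
    · have hx' : 0 ≤ x := not_lt.mp hx
      have h1 := insertBy_true x hx' (neg ++ pos)
      simp only [List.foldl_cons, List.append_assoc] at h1 ⊢
      rw [h1]
      have h2 := ih neg (pos ++ [x]) hneg
        (by intro y hy; rcases List.mem_append.mp hy with h | h
            · exact hpos y h
            · simp at h; omega)
      simpa [List.filter_cons, hx] using h2

-- ===== VERDICT (by name: the statement is the Claim_ definition above) =====
theorem rearrange_list2_spec : Claim_equal_rearrange_list2 := by
  intro lst _
  unfold Spec_rearrange_list2 rearrange_list2 rearrange_list2_alt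
  rw [PySem.List.sorted_eq_foldl_insertBy, rearrangeA_foldl]
  have := sorted_bool_key lst [] [] (by simp) (by simp)
  simpa using this.symm
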